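-- pv_equiv track=rewrite | github.com/srijan00244/Gemstone-Analysis | app.py | _shapes_match
-- ===== SOURCE A (Python) =====
-- def _shapes_match(extracted_shape: str, dataset_shape: str) -> bool:
--     """Check if shapes match with flexible matching for similar shapes"""
--     if not extracted_shape or not dataset_shape:
--         return False
--
--     # Handle common shape aliases
--     shape_aliases = {
--         'OVAL': ['OVAL', 'OV'],
--         'ROUND': ['ROUND', 'R'],
--         'EMERALD': ['EMERALD', 'EM'],
--         'PEAR': ['PEAR', 'PS'],  # PS = Pear Shape
--         'HEART': ['HEART', 'HT'],
--         'CUSHION': ['CUSHION', 'CU'],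
--         'ASSCHER': ['ASSCHER', 'AS'],
--         'SQUARE': ['SQUARE', 'SQ'],
--         'BAGUETTE': ['BAGUETTE', 'STRAIGHT BAGUETTE', 'STB']
--     }
--
--     for base_shape, aliases in shape_aliases.items():
--         if extracted_shape in aliases and dataset_shape in aliases:
--             return True
--
--     return False
-- ===== SOURCE B (Python) =====
-- _SHAPE_ALIASES = {
--     'OVAL': ['OVAL', 'OV'],
--     'ROUND': ['ROUND', 'R'],
--     'EMERALD': ['EMERALD', 'EM'],
--     'PEAR': ['PEAR', 'PS'],
--     'HEART': ['HEART', 'HT'],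
--     'CUSHION': ['CUSHION', 'CU'],
--     'ASSCHER': ['ASSCHER', 'AS'],
--     'SQUARE': ['SQUARE', 'SQ'],
--     'BAGUETTE': ['BAGUETTE', 'STRAIGHT BAGUETTE', 'STB'],
-- }
--
--
-- def _shapes_match(extracted_shape: str, dataset_shape: str) -> bool:
--     """Table-then-lookup: map each alias to its base shape once, then compare."""
--     canon = {}
--     for base, aliases in _SHAPE_ALIASES.items():
--         for alias in aliases:
--             canon[alias] = base
--     group = canon.get(extracted_shape)
--     return group is not None and canon.get(dataset_shape) == group
-- ===== Notes on version B (the rewrite author's own statement) =====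
-- stated objective: idiomatic
-- what changed: Instead of scanning every alias group for joint membership, B flattens the alias lists once into a reverse alias-to-base dict and decides the match with two lookups (first key present and both map to the same base).
import Mathlib
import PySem

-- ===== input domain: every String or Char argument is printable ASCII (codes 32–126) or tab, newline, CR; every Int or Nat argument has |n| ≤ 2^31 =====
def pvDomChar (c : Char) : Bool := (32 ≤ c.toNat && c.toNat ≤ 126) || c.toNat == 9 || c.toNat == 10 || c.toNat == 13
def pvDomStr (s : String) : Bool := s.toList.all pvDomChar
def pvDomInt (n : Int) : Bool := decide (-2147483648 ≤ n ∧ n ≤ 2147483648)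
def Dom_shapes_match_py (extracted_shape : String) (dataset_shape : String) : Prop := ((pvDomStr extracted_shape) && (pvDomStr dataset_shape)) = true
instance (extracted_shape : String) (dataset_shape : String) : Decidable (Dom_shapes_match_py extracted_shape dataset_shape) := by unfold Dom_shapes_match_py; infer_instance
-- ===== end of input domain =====

-- B replaces A's per-group membership scans by a reverse alias→base table built once, deciding with two lookups (idiomatic).

-- shared literal data: the alias table from the Python source
def pvGroups : List (String × List String) :=
  [("OVAL", ["OVAL", "OV"]),
   ("ROUND", ["ROUND", "R"]),
   ("EMERALD", ["EMERALD", "EM"]),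
   ("PEAR", ["PEAR", "PS"]),
   ("HEART", ["HEART", "HT"]),
   ("CUSHION", ["CUSHION", "CU"]),
   ("ASSCHER", ["ASSCHER", "AS"]),
   ("SQUARE", ["SQUARE", "SQ"]),
   ("BAGUETTE", ["BAGUETTE", "STRAIGHT BAGUETTE", "STB"])]

-- ===== PORT A =====
-- the 'for base_shape, aliases in shape_aliases.items(): if … return True' loop
def pvALoop (e d : String) : List (String × List String) → Bool
  | [] => false
  | (_, al) :: rest => if al.contains e && al.contains d then true else pvALoop e d rest

def shapes_match_py (extracted_shape : String) (dataset_shape : String) : Bool :=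
  if extracted_shape == "" || dataset_shape == "" then false
  else pvALoop extracted_shape dataset_shape pvGroups

-- ===== PORT B =====
-- canon = {}; for base, aliases in _SHAPE_ALIASES.items(): for alias in aliases: canon[alias] = base
def pvCanon : PySem.Dict String String :=
  pvGroups.foldl (fun c p => p.2.foldl (fun c a => c.insert a p.1) c) PySem.Dict.empty

def shapes_match_py_alt (extracted_shape : String) (dataset_shape : String) : Bool :=
  match pvCanon.get? extracted_shape with
  | none => false
  | some g => pvCanon.get? dataset_shape == some g

-- ===== PRECONDITION & SPEC =====
def Spec_shapes_match_py (extracted_shape : String) (dataset_shape : String) (out : Bool) : Prop := out = shapes_match_py_alt extracted_shape dataset_shape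
instance (extracted_shape : String) (dataset_shape : String) (out : Bool) : Decidable (Spec_shapes_match_py extracted_shape dataset_shape out) := by unfold Spec_shapes_match_py; infer_instance

-- ===== CLAIM (what is proved, stated in full; the proofs are below) =====
def Claim_equal_shapes_match_py : Prop := ∀ (extracted_shape : String) (dataset_shape : String), Dom_shapes_match_py extracted_shape dataset_shape → Spec_shapes_match_py extracted_shape dataset_shape (shapes_match_py extracted_shape dataset_shape)

-- ===== LEMMAS AND PROOFS =====

-- all 19 alias strings
def pvKeys : List String :=
  ["OVAL", "OV", "ROUND", "R", "EMERALD", "EM", "PEAR", "PS", "HEART", "HT",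
   "CUSHION", "CU", "ASSCHER", "AS", "SQUARE", "SQ", "BAGUETTE", "STRAIGHT BAGUETTE", "STB"]

lemma pvCanon_get?_none (x : String) (hx : x ∉ pvKeys) : pvCanon.get? x = none := by
  have hmk : pvCanon = PySem.Dict.mk
      [("OVAL", "OVAL"), ("OV", "OVAL"), ("ROUND", "ROUND"), ("R", "ROUND"),
       ("EMERALD", "EMERALD"), ("EM", "EMERALD"), ("PEAR", "PEAR"), ("PS", "PEAR"),
       ("HEART", "HEART"), ("HT", "HEART"), ("CUSHION", "CUSHION"), ("CU", "CUSHION"),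
       ("ASSCHER", "ASSCHER"), ("AS", "ASSCHER"), ("SQUARE", "SQUARE"), ("SQ", "SQUARE"),
       ("BAGUETTE", "BAGUETTE"), ("STRAIGHT BAGUETTE", "BAGUETTE"), ("STB", "BAGUETTE")] := by
    decide
  simp only [pvKeys, List.mem_cons, List.not_mem_nil, or_false, not_or] at hx
  obtain ⟨h1, h2, h3, h4, h5, h6, h7, h8, h9, h10, h11, h12, h13, h14, h15, h16, h17, h18, h19⟩ := hx
  simp [hmk, PySem.Dict.get?,
    Ne.symm h1, Ne.symm h2, Ne.symm h3, Ne.symm h4, Ne.symm h5, Ne.symm h6, Ne.symm h7,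
    Ne.symm h8, Ne.symm h9, Ne.symm h10, Ne.symm h11, Ne.symm h12, Ne.symm h13, Ne.symm h14,
    Ne.symm h15, Ne.symm h16, Ne.symm h17, Ne.symm h18, Ne.symm h19]

lemma pvALoop_false_left (e d : String) (he : e ∉ pvKeys) : pvALoop e d pvGroups = false := by
  simp only [pvKeys, List.mem_cons, List.not_mem_nil, or_false, not_or] at he
  obtain ⟨h1, h2, h3, h4, h5, h6, h7, h8, h9, h10, h11, h12, h13, h14, h15, h16, h17, h18, h19⟩ := he
  simp [pvALoop, pvGroups, List.contains_eq_mem,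
    h1, h2, h3, h4, h5, h6, h7, h8, h9, h10, h11, h12, h13, h14, h15, h16, h17, h18, h19]

lemma pvALoop_false_right (e d : String) (hd : d ∉ pvKeys) : pvALoop e d pvGroups = false := by
  simp only [pvKeys, List.mem_cons, List.not_mem_nil, or_false, not_or] at hd
  obtain ⟨h1, h2, h3, h4, h5, h6, h7, h8, h9, h10, h11, h12, h13, h14, h15, h16, h17, h18, h19⟩ := hd
  simp [pvALoop, pvGroups, List.contains_eq_mem,
    h1, h2, h3, h4, h5, h6, h7, h8, h9, h10, h11, h12, h13, h14, h15, h16, h17, h18, h19]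

lemma pv_main (e d : String) : shapes_match_py e d = shapes_match_py_alt e d := by
  by_cases he : e ∈ pvKeys
  · by_cases hd : d ∈ pvKeys
    · -- both are alias strings: finitely many literal cases
      simp only [pvKeys, List.mem_cons, List.not_mem_nil, or_false] at he hd
      rcases he with rfl|rfl|rfl|rfl|rfl|rfl|rfl|rfl|rfl|rfl|rfl|rfl|rfl|rfl|rfl|rfl|rfl|rfl|rfl <;>
        (rcases hd with rfl|rfl|rfl|rfl|rfl|rfl|rfl|rfl|rfl|rfl|rfl|rfl|rfl|rfl|rfl|rfl|rfl|rfl|rfl <;> decide)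
    · have hA : pvALoop e d pvGroups = false := pvALoop_false_right e d hd
      have hB : pvCanon.get? d = none := pvCanon_get?_none d hd
      cases hge : pvCanon.get? e <;>
        simp [shapes_match_py, shapes_match_py_alt, hA, hB, hge]
  · have hA : pvALoop e d pvGroups = false := pvALoop_false_left e d he
    have hB : pvCanon.get? e = none := pvCanon_get?_none e he
    simp [shapes_match_py, shapes_match_py_alt, hA, hB]

-- ===== VERDICT (by name: the statement is the Claim_ definition above) =====
theorem shapes_match_py_spec : Claim_equal_shapes_match_py := by
  intro e d _
  unfold Spec_shapes_match_py
  exact pv_main e d
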